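-- pv_equiv track=rewrite | github.com/Ath-07/TensorTonic-Solutions | morphological-operations/morphological-operations.py | morphological_op
-- ===== SOURCE A (Python) =====
-- def morphological_op(image, kernel, operation):
--     """
--     Apply morphological erosion or dilation to a binary image.
--     """
--     # Write code here
--     H, W = len(image), len(image[0])
--     kH, kW = len(kernel), len(kernel[0])
--
--     pad_h, pad_w = kH // 2, kW // 2
--
--     padded = [[0] * (W + 2 * pad_w) for _ in range(H + 2 * pad_h)]
--     for i in range(H):
--         for j in range(W):
--             padded[i + pad_h][j + pad_w] = image[i][j]
--
--     result = [[0] * W for _ in range(H)]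
--
--     for i in range(H):
--         for j in range(W):
--
--             if operation == "erode":
--                 value = 1
--
--                 for x in range(kH):
--                     for y in range(kW):
--                         if kernel[x][y] == 1:
--                             if padded[i + x][j + y] != 1:
--                                 value = 0
--                                 break
--                     if value == 0:
--                         break
--
--                 result[i][j] = value
--
--             elif operation == "dilate":
--                 value = 0
--
--                 for x in range(kH):
--                     for y in range(kW):
--                         if kernel[x][y] == 1:
--                             if padded[i + x][j + y] == 1:
--                                 value = 1
--                                 break
--                     if value == 1:
--                         break
--
--                 result[i][j] = value
--
--     return result
-- ===== SOURCE B (Python) =====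
-- def morphological_op(image, kernel, operation):
--     """Kernel-major re-implementation: collect active kernel offsets once, then
--     sweep the whole grid once per offset, accumulating the result."""
--     H, W = len(image), len(image[0])
--     kH, kW = len(kernel), len(kernel[0])
--     pad_h, pad_w = kH // 2, kW // 2
--     offsets = [(x, y) for x in range(kH) for y in range(kW) if kernel[x][y] == 1]
--     zrow = [0] * (W + 2 * pad_w)
--     zpad = [0] * pad_w
--     padded = ([zrow[:] for _ in range(pad_h)]
--               + [zpad + row[:W] + zpad for row in image]
--               + [zrow[:] for _ in range(pad_h)])
--     if operation == "erode":
--         result = [[1] * W for _ in range(H)]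
--         for (x, y) in offsets:
--             result = [[0 if padded[i + x][j + y] != 1 else result[i][j]
--                        for j in range(W)] for i in range(H)]
--     elif operation == "dilate":
--         result = [[0] * W for _ in range(H)]
--         for (x, y) in offsets:
--             result = [[1 if padded[i + x][j + y] == 1 else result[i][j]
--                        for j in range(W)] for i in range(H)]
--     else:
--         result = [[0] * W for _ in range(H)]
--     return result
-- ===== Notes on version B (the rewrite author's own statement) =====
-- stated objective: alternative
-- what changed: Pixel-major nested kernel scans with early break are replaced by kernel-major accumulation: the active kernel offsets are collected once, and for each offset the whole result grid is rebuilt from the previous one; the padded image is built by list concatenation instead of index assignment.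
-- outside the precondition, e.g. on morphological_op([[0]], [[1, 1], [1]], 'erode'): A returns [[0]], B raises IndexError
import Mathlib
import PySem

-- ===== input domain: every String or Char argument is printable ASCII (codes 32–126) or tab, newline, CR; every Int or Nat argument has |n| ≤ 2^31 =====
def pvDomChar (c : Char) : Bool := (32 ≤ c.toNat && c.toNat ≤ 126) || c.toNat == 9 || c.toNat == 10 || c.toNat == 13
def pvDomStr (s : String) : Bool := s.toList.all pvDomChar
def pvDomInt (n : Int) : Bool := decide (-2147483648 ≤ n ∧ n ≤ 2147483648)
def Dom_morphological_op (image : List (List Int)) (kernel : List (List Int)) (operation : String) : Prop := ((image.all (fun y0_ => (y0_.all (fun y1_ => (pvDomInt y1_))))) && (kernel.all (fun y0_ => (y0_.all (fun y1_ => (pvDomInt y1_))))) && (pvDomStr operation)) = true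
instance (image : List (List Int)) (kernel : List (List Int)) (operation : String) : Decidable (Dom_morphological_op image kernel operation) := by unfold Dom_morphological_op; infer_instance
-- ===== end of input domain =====

-- B replaces A's pixel-major kernel scans by kernel-major accumulation over the list of
-- active offsets (an alternative decomposition, not claimed faster).

-- ===== PORT A =====
-- Python `padded[a][b] = v` (a, b nonnegative and in range under Pre_, so set is exact).
def pvSet2 (g : List (List Int)) (a b : Nat) (v : Int) : List (List Int) :=
  g.set a ((g.getD a []).set b v)

-- Literal port of A.  Indices are nonnegative and (under Pre_) in range, so `getD` is
-- exact for Python's indexing; `range` over nonnegative bounds is `List.range`; the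
-- `break` statements only ever freeze an already-final value (0 for erode, 1 for
-- dilate), ported as the `if v = 0/1 then v` guards; when `operation` matches neither
-- branch the loop body does nothing, leaving the all-zero `result0`.
def morphological_op (image : List (List Int)) (kernel : List (List Int)) (operation : String) : List (List Int) :=
  let H := image.length
  let W := (image.getD 0 []).length
  let kH := kernel.length
  let kW := (kernel.getD 0 []).length
  let ph := kH / 2
  let pw := kW / 2
  let padded := (List.range H).foldl (fun p i =>
      (List.range W).foldl (fun p j =>
        pvSet2 p (i + ph) (j + pw) ((image.getD i []).getD j 0)) p)
      (List.replicate (H + 2 * ph) (List.replicate (W + 2 * pw) (0 : Int)))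
  let result0 := List.replicate H (List.replicate W (0 : Int))
  if operation == "erode" then
    (List.range H).foldl (fun r i =>
      (List.range W).foldl (fun r j =>
        let value := (List.range kH).foldl (fun v x =>
          if v = 0 then v else
          (List.range kW).foldl (fun v y =>
            if v = 0 then v else
            if (kernel.getD x []).getD y 0 = 1 then
              (if (padded.getD (i + x) []).getD (j + y) 0 ≠ 1 then 0 else v)
            else v) v) (1 : Int)
        pvSet2 r i j value) r) result0
  else if operation == "dilate" then
    (List.range H).foldl (fun r i =>
      (List.range W).foldl (fun r j =>
        let value := (List.range kH).foldl (fun v x =>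
          if v = 1 then v else
          (List.range kW).foldl (fun v y =>
            if v = 1 then v else
            if (kernel.getD x []).getD y 0 = 1 then
              (if (padded.getD (i + x) []).getD (j + y) 0 = 1 then 1 else v)
            else v) v) (0 : Int)
        pvSet2 r i j value) r) result0
  else result0

-- ===== PORT B =====
-- Literal port of Source B: offsets by comprehension (flatMap/filterMap over ranges),
-- padded image by concatenation (`row[:W]` = `row.take W`, exact since W ≥ 0),
-- then one rebuild of the result grid per active offset.
def morphological_op_alt (image : List (List Int)) (kernel : List (List Int)) (operation : String) : List (List Int) :=
  let H := image.length
  let W := (image.getD 0 []).length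
  let kH := kernel.length
  let kW := (kernel.getD 0 []).length
  let ph := kH / 2
  let pw := kW / 2
  let offsets := (List.range kH).flatMap (fun x => (List.range kW).filterMap (fun y =>
      if (kernel.getD x []).getD y 0 = 1 then some (x, y) else none))
  let zrow := List.replicate (W + 2 * pw) (0 : Int)
  let zpad := List.replicate pw (0 : Int)
  let padded := List.replicate ph zrow
      ++ image.map (fun row => zpad ++ row.take W ++ zpad)
      ++ List.replicate ph zrow
  if operation == "erode" then
    offsets.foldl (fun r xy =>
      (List.range H).map (fun i => (List.range W).map (fun j =>
        if (padded.getD (i + xy.1) []).getD (j + xy.2) 0 ≠ 1 then 0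
        else (r.getD i []).getD j 0)))
      (List.replicate H (List.replicate W (1 : Int)))
  else if operation == "dilate" then
    offsets.foldl (fun r xy =>
      (List.range H).map (fun i => (List.range W).map (fun j =>
        if (padded.getD (i + xy.1) []).getD (j + xy.2) 0 = 1 then 1
        else (r.getD i []).getD j 0)))
      (List.replicate H (List.replicate W (0 : Int)))
  else List.replicate H (List.replicate W (0 : Int))

-- ===== PRECONDITION & SPEC =====
-- Pre_ excludes the empty image/kernel and ragged inputs (a row shorter than the first
-- row): there Python A raises IndexError — except that a ragged kernel row may be
-- skipped by A's early break, in which case A returns but B raises IndexError while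
-- building the offset list.
def Pre_morphological_op (image : List (List Int)) (kernel : List (List Int)) (operation : String) : Prop :=
  image ≠ [] ∧ kernel ≠ [] ∧
  (∀ row ∈ image, (image.getD 0 []).length ≤ row.length) ∧
  (∀ row ∈ kernel, (kernel.getD 0 []).length ≤ row.length)
instance (image : List (List Int)) (kernel : List (List Int)) (operation : String) : Decidable (Pre_morphological_op image kernel operation) := by unfold Pre_morphological_op; infer_instance

def pvWitness_morphological_op : List (List Int) × List (List Int) × String :=
  ([[1, 0], [0, 1]], [[1, 1], [1, 1]], "erode")

def Spec_morphological_op (image : List (List Int)) (kernel : List (List Int)) (operation : String) (out : List (List Int)) : Prop := out = morphological_op_alt image kernel operation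
instance (image : List (List Int)) (kernel : List (List Int)) (operation : String) (out : List (List Int)) : Decidable (Spec_morphological_op image kernel operation out) := by unfold Spec_morphological_op; infer_instance

-- ===== CLAIM (what is proved, stated in full; the proofs are below) =====
def Claim_equal_morphological_op : Prop := ∀ (image : List (List Int)) (kernel : List (List Int)) (operation : String), Dom_morphological_op image kernel operation → Pre_morphological_op image kernel operation → Spec_morphological_op image kernel operation (morphological_op image kernel operation)

-- ===== LEMMAS AND PROOFS =====

-- A fold that repeatedly mutates row `i` of the grid is the single mutation of row `i`
-- by the folded row update.
theorem pv_foldl_samerow (u : List Int → Nat → List Int) (js : List Nat) :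
    ∀ (i : Nat) (g0 : List (List Int)),
    js.foldl (fun g j => g.set i (u (g.getD i []) j)) g0
      = g0.set i (js.foldl u (g0.getD i [])) := by
  induction js with
  | nil =>
    intro i g0
    by_cases h : i < g0.length
    · simp [List.getD, List.getElem?_eq_getElem h, List.set_getElem_self h]
    · simp [List.set_eq_of_length_le (by omega : g0.length ≤ i)]
  | cons j js ih =>
    intro i g0
    by_cases h : i < g0.length
    · simp only [List.foldl_cons, ih]
      have hg : (g0.set i (u (g0.getD i []) j)).getD i [] = u (g0.getD i []) j := by
        simp [List.getD, List.getElem?_set_self h]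
      rw [hg, List.set_set]
    · have hs : ∀ (r : List Int), g0.set i r = g0 := fun r =>
        List.set_eq_of_length_le (by omega)
      simp only [List.foldl_cons, hs]
      rw [ih i g0, hs]

-- Filling positions off, off+1, …, off+W-1 of a row by successive `set`s.
theorem pv_rowfold (f : Nat → Int) :
    ∀ (W off : Nat) (r0 : List Int), off + W ≤ r0.length →
    (List.range W).foldl (fun r j => r.set (j + off) (f j)) r0
      = r0.take off ++ (List.range W).map f ++ r0.drop (off + W) := by
  intro W
  induction W with
  | zero => intro off r0 h; simp
  | succ W ih =>
    intro off r0 h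
    rw [List.range_succ, List.foldl_append, List.foldl_cons, List.foldl_nil,
      ih off r0 (by omega)]
    have hlt : off + W < r0.length := by omega
    have hoff : off ≤ r0.length := by omega
    have hlen : (r0.take off ++ (List.range W).map f).length = off + W := by
      simp [List.length_take, Nat.min_eq_left hoff]
    rw [List.drop_eq_getElem_cons hlt, List.set_append]
    rw [if_neg (by rw [hlen]; omega), hlen]
    have hz : W + off - (off + W) = 0 := by omega
    rw [hz, List.set_cons_zero, List.map_append]
    simp [List.append_assoc, Nat.add_assoc]

-- Successively replacing rows off, off+1, …, off+n-1 of a grid, each computed from the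
-- (still original) row it replaces.
theorem pv_gridfold (F : Nat → List Int → List Int) :
    ∀ (n off : Nat) (g0 : List (List Int)), off + n ≤ g0.length →
    (List.range n).foldl (fun g i => g.set (i + off) (F i (g.getD (i + off) []))) g0
      = g0.take off ++ (List.range n).map (fun i => F i (g0.getD (i + off) [])) ++ g0.drop (off + n) := by
  intro n
  induction n with
  | zero => intro off g0 h; simp
  | succ n ih =>
    intro off g0 h
    rw [List.range_succ, List.foldl_append, List.foldl_cons, List.foldl_nil,
      ih off g0 (by omega)]
    have hlt : off + n < g0.length := by omega
    have hoff : off ≤ g0.length := by omega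
    have hlen : (g0.take off ++ (List.range n).map (fun i => F i (g0.getD (i + off) []))).length = off + n := by
      simp [List.length_take, Nat.min_eq_left hoff]
    have hget : (g0.take off ++ (List.range n).map (fun i => F i (g0.getD (i + off) [])) ++ g0.drop (off + n)).getD (n + off) [] = g0.getD (n + off) [] := by
      rw [List.getD, List.append_assoc, List.getElem?_append_right (by simp only [List.length_take]; omega)]
      rw [List.getElem?_append_right (by simp only [List.length_map, List.length_range, List.length_take]; omega)]
      simp only [List.length_take, Nat.min_eq_left hoff, List.length_map, List.length_range]
      rw [List.getElem?_drop, List.getD]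
      congr 2
      omega
    rw [hget, List.drop_eq_getElem_cons hlt, List.set_append]
    rw [if_neg (by rw [hlen]; omega), hlen]
    have hz : n + off - (off + n) = 0 := by omega
    rw [hz, List.set_cons_zero, List.map_append]
    simp [List.append_assoc, Nat.add_assoc]

-- getD of a map over a range.
theorem pv_getD_range_map {α : Type} [Inhabited α] (n : Nat) (f : Nat → α) (i : Nat) (d : α) :
    (((List.range n).map f).getD i d) = if i < n then f i else d := by
  rcases Nat.lt_or_ge i n with h | h
  · rw [List.getD, List.getElem?_map]
    simp [h]
  · rw [List.getD, List.getElem?_eq_none (by simpa using h)]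
    simp [Nat.not_lt.mpr h]

-- A row read back entrywise is its prefix.
theorem pv_map_getD_take (row : List Int) (W : Nat) (h : W ≤ row.length) :
    (List.range W).map (fun j => row.getD j 0) = row.take W := by
  apply List.ext_getElem
  · simp; omega
  · intro k h1 h2
    simp only [List.getElem_map, List.getElem_range, List.getElem_take]
    have : k < row.length := by simp at h1; omega
    simp [List.getD, List.getElem?_eq_getElem this]

-- Reading a list entrywise over its index range is the list itself (mapped).
theorem pv_map_range_getD {α β : Type} [Inhabited α] (l : List α) (G : α → β) :
    (List.range l.length).map (fun i => G (l.getD i default)) = l.map G := by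
  apply List.ext_getElem
  · simp
  · intro k h1 h2
    have : k < l.length := by simpa using h1
    simp [List.getD, List.getElem?_eq_getElem this]

theorem pv_replicate_eq_range_map {α : Type} (n : Nat) (a : α) :
    List.replicate n a = (List.range n).map (fun _ => a) := by
  simp

-- A's loops with the value already frozen by `break` keep it.
theorem pv_frozen (ys : List Nat) (f : Int → Nat → Int) (c : Int) (hf : ∀ y, f c y = c) :
    ys.foldl f c = c := by
  induction ys with
  | nil => rfl
  | cons y ys ih => simp [List.foldl_cons, hf, ih]

-- A's erode loops: the nested fold computes the "every active offset hits" test.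
theorem pv_erode_inner (a b : Nat → Prop) [DecidablePred a] [DecidablePred b] (ys : List Nat) :
    ys.foldl (fun v y => if v = 0 then v else
        if a y then (if b y then 0 else v) else v) (1 : Int)
      = if (∀ y ∈ ys, a y → ¬ b y) then 1 else 0 := by
  induction ys with
  | nil => simp
  | cons y ys ih =>
    simp only [List.foldl_cons]
    rw [if_neg (by norm_num : ¬ (1:Int) = 0)]
    by_cases ha : a y
    · by_cases hb : b y
      · rw [if_pos ha, if_pos hb, pv_frozen ys _ 0 (fun y => by simp)]
        have hno : ¬ (∀ z ∈ y :: ys, a z → ¬ b z) := fun h => (h y (by simp) ha) hb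
        rw [if_neg hno]
      · rw [if_pos ha, if_neg hb, ih]
        exact if_congr (by simp [hb]) rfl rfl
    · rw [if_neg ha, ih]
      exact if_congr (by simp [ha]) rfl rfl

theorem pv_erode_outer (a b : Nat → Nat → Prop) [∀ x y, Decidable (a x y)]
    [∀ x y, Decidable (b x y)] (xs : List Nat) (kW : Nat) :
    xs.foldl (fun v x => if v = 0 then v else
        (List.range kW).foldl (fun v y => if v = 0 then v else
          if a x y then (if b x y then 0 else v) else v) v) (1 : Int)
      = if (∀ x ∈ xs, ∀ y ∈ List.range kW, a x y → ¬ b x y) then 1 else 0 := by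
  induction xs with
  | nil => simp
  | cons x xs ih =>
    simp only [List.foldl_cons]
    rw [if_neg (by norm_num : ¬ (1:Int) = 0), pv_erode_inner]
    by_cases hx : ∀ y ∈ List.range kW, a x y → ¬ b x y
    · rw [if_pos hx, ih]
      exact if_congr (by rw [List.forall_mem_cons]; exact (and_iff_right hx).symm) rfl rfl
    · rw [if_neg hx, pv_frozen xs _ 0 (fun x => by simp)]
      have hno : ¬ (∀ z ∈ x :: xs, ∀ y ∈ List.range kW, a z y → ¬ b z y) :=
        fun h => hx (h x (by simp))
      rw [if_neg hno]

-- A's dilate loops: the nested fold computes the "some active offset hits" test.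
theorem pv_dilate_inner (a b : Nat → Prop) [DecidablePred a] [DecidablePred b] (ys : List Nat) :
    ys.foldl (fun v y => if v = 1 then v else
        if a y then (if b y then 1 else v) else v) (0 : Int)
      = if (∃ y ∈ ys, a y ∧ b y) then 1 else 0 := by
  induction ys with
  | nil => simp
  | cons y ys ih =>
    simp only [List.foldl_cons]
    rw [if_neg (by norm_num : ¬ (0:Int) = 1)]
    by_cases ha : a y
    · by_cases hb : b y
      · rw [if_pos ha, if_pos hb, pv_frozen ys _ 1 (fun y => by simp)]
        have hyes : ∃ z ∈ y :: ys, a z ∧ b z := ⟨y, by simp, ha, hb⟩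
        rw [if_pos hyes]
      · rw [if_pos ha, if_neg hb, ih]
        exact if_congr (by simp [hb]) rfl rfl
    · rw [if_neg ha, ih]
      exact if_congr (by simp [ha]) rfl rfl

theorem pv_dilate_outer (a b : Nat → Nat → Prop) [∀ x y, Decidable (a x y)]
    [∀ x y, Decidable (b x y)] (xs : List Nat) (kW : Nat) :
    xs.foldl (fun v x => if v = 1 then v else
        (List.range kW).foldl (fun v y => if v = 1 then v else
          if a x y then (if b x y then 1 else v) else v) v) (0 : Int)
      = if (∃ x ∈ xs, ∃ y ∈ List.range kW, a x y ∧ b x y) then 1 else 0 := by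
  induction xs with
  | nil => simp
  | cons x xs ih =>
    simp only [List.foldl_cons]
    rw [if_neg (by norm_num : ¬ (0:Int) = 1), pv_dilate_inner]
    by_cases hx : ∃ y ∈ List.range kW, a x y ∧ b x y
    · rw [if_pos hx, pv_frozen xs _ 1 (fun x => by simp)]
      have hyes : ∃ z ∈ x :: xs, ∃ y ∈ List.range kW, a z y ∧ b z y := ⟨x, by simp, hx⟩
      rw [if_pos hyes]
    · rw [if_neg hx, ih]
      exact if_congr (by rw [List.exists_mem_cons_iff]; exact (or_iff_right hx).symm) rfl rfl

-- B's erode accumulation, pointwise: starting from the indicator grid of c0, folding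
-- the offset list conjoins each offset's miss test.
theorem pv_B_erode (q : Nat → Nat → Nat × Nat → Prop) [∀ i j xy, Decidable (q i j xy)]
    (H W : Nat) (os : List (Nat × Nat)) :
    ∀ (c0 : Nat → Nat → Prop), ∀ _ : (∀ i j, Decidable (c0 i j)),
    os.foldl (fun r xy =>
        (List.range H).map (fun i => (List.range W).map (fun j =>
          if q i j xy then (0 : Int) else (r.getD i []).getD j 0)))
      ((List.range H).map (fun i => (List.range W).map (fun j => if c0 i j then (1 : Int) else 0)))
    = (List.range H).map (fun i => (List.range W).map (fun j =>
        if (c0 i j ∧ ∀ xy ∈ os, ¬ q i j xy) then 1 else 0)) := by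
  induction os with
  | nil => intro c0 hc; simp
  | cons xy os ih =>
    intro c0 hc
    simp only [List.foldl_cons]
    have hstep : (List.range H).map (fun i => (List.range W).map (fun j =>
        if q i j xy then (0 : Int) else
          ((((List.range H).map (fun i => (List.range W).map (fun j => if c0 i j then (1 : Int) else 0))).getD i []).getD j 0)))
      = (List.range H).map (fun i => (List.range W).map (fun j =>
          if (c0 i j ∧ ¬ q i j xy) then (1 : Int) else 0)) := by
      apply List.map_congr_left
      intro i hi
      apply List.map_congr_left
      intro j hj
      rw [pv_getD_range_map, if_pos (List.mem_range.mp hi), pv_getD_range_map,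
        if_pos (List.mem_range.mp hj)]
      by_cases hq : q i j xy <;> by_cases hcij : c0 i j <;> simp [hq, hcij]
    rw [hstep, ih (fun i j => c0 i j ∧ ¬ q i j xy) (fun i j => inferInstance)]
    apply List.map_congr_left
    intro i hi
    apply List.map_congr_left
    intro j hj
    exact if_congr (by rw [List.forall_mem_cons]; exact and_assoc) rfl rfl

-- B's dilate accumulation, pointwise: folding the offset list disjoins each offset's
-- hit test.
theorem pv_B_dilate (q : Nat → Nat → Nat × Nat → Prop) [∀ i j xy, Decidable (q i j xy)]
    (H W : Nat) (os : List (Nat × Nat)) :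
    ∀ (c0 : Nat → Nat → Prop), ∀ _ : (∀ i j, Decidable (c0 i j)),
    os.foldl (fun r xy =>
        (List.range H).map (fun i => (List.range W).map (fun j =>
          if q i j xy then (1 : Int) else (r.getD i []).getD j 0)))
      ((List.range H).map (fun i => (List.range W).map (fun j => if c0 i j then (1 : Int) else 0)))
    = (List.range H).map (fun i => (List.range W).map (fun j =>
        if (c0 i j ∨ ∃ xy ∈ os, q i j xy) then 1 else 0)) := by
  induction os with
  | nil => intro c0 hc; simp
  | cons xy os ih =>
    intro c0 hc
    simp only [List.foldl_cons]
    have hstep : (List.range H).map (fun i => (List.range W).map (fun j =>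
        if q i j xy then (1 : Int) else
          ((((List.range H).map (fun i => (List.range W).map (fun j => if c0 i j then (1 : Int) else 0))).getD i []).getD j 0)))
      = (List.range H).map (fun i => (List.range W).map (fun j =>
          if (c0 i j ∨ q i j xy) then (1 : Int) else 0)) := by
      apply List.map_congr_left
      intro i hi
      apply List.map_congr_left
      intro j hj
      rw [pv_getD_range_map, if_pos (List.mem_range.mp hi), pv_getD_range_map,
        if_pos (List.mem_range.mp hj)]
      by_cases hq : q i j xy <;> by_cases hcij : c0 i j <;> simp [hq, hcij]
    rw [hstep, ih (fun i j => c0 i j ∨ q i j xy) (fun i j => inferInstance)]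
    apply List.map_congr_left
    intro i hi
    apply List.map_congr_left
    intro j hj
    exact if_congr (by rw [List.exists_mem_cons_iff]; exact or_assoc) rfl rfl

-- A's double write loop on the result grid is a double map.
theorem pv_resultA (val : Nat → Nat → Int) (H W : Nat) :
    (List.range H).foldl (fun r i => (List.range W).foldl (fun r j => pvSet2 r i j (val i j)) r)
      (List.replicate H (List.replicate W (0 : Int)))
    = (List.range H).map (fun i => (List.range W).map (fun j => val i j)) := by
  have hbody : (fun (r : List (List Int)) (i : Nat) =>
        (List.range W).foldl (fun r j => pvSet2 r i j (val i j)) r)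
      = fun r i => r.set i ((List.range W).foldl (fun row j => row.set j (val i j)) (r.getD i [])) := by
    funext r i
    exact pv_foldl_samerow (fun row j => row.set j (val i j)) (List.range W) i r
  rw [hbody]
  have hg := pv_gridfold (fun i row => (List.range W).foldl (fun row j => row.set j (val i j)) row)
    H 0 (List.replicate H (List.replicate W (0 : Int))) (by simp)
  simp only [Nat.add_zero, Nat.zero_add] at hg
  rw [hg]
  simp only [List.take_zero, List.drop_replicate, Nat.sub_self, List.replicate_zero,
    List.nil_append, List.append_nil]
  apply List.map_congr_left
  intro i hi
  have hrep : (List.replicate H (List.replicate W (0 : Int))).getD i []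
      = List.replicate W (0 : Int) := by
    rw [List.getD, List.getElem?_replicate, if_pos (List.mem_range.mp hi)]
    rfl
  rw [hrep]
  have hr := pv_rowfold (val i) W 0 (List.replicate W (0 : Int)) (by simp)
  simp only [Nat.add_zero, Nat.zero_add] at hr
  rw [hr]
  simp

-- A's padding loop builds exactly B's concatenated padded image.
theorem pv_padded_eq (image : List (List Int)) (ph pw W : Nat)
    (h : ∀ row ∈ image, W ≤ row.length) :
    (List.range image.length).foldl (fun p i =>
        (List.range W).foldl (fun p j =>
          pvSet2 p (i + ph) (j + pw) ((image.getD i []).getD j 0)) p)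
      (List.replicate (image.length + 2 * ph) (List.replicate (W + 2 * pw) (0 : Int)))
    = List.replicate ph (List.replicate (W + 2 * pw) (0 : Int))
      ++ image.map (fun row => List.replicate pw (0 : Int) ++ row.take W ++ List.replicate pw (0 : Int))
      ++ List.replicate ph (List.replicate (W + 2 * pw) (0 : Int)) := by
  have hbody : (fun (p : List (List Int)) (i : Nat) =>
        (List.range W).foldl (fun p j => pvSet2 p (i + ph) (j + pw) ((image.getD i []).getD j 0)) p)
      = fun p i => p.set (i + ph)
          ((List.range W).foldl (fun row j => row.set (j + pw) ((image.getD i []).getD j 0)) (p.getD (i + ph) [])) := by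
    funext p i
    exact pv_foldl_samerow (fun row j => row.set (j + pw) ((image.getD i []).getD j 0)) (List.range W) (i + ph) p
  rw [hbody]
  have hg := pv_gridfold
    (fun i row => (List.range W).foldl (fun row j => row.set (j + pw) ((image.getD i []).getD j 0)) row)
    image.length ph (List.replicate (image.length + 2 * ph) (List.replicate (W + 2 * pw) (0 : Int)))
    (by simp; omega)
  rw [hg]
  have htake : (List.replicate (image.length + 2 * ph) (List.replicate (W + 2 * pw) (0 : Int))).take ph
      = List.replicate ph (List.replicate (W + 2 * pw) (0 : Int)) := by
    rw [List.take_replicate]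
    congr 1
    omega
  have hdrop : (List.replicate (image.length + 2 * ph) (List.replicate (W + 2 * pw) (0 : Int))).drop (ph + image.length)
      = List.replicate ph (List.replicate (W + 2 * pw) (0 : Int)) := by
    rw [List.drop_replicate]
    congr 1
    omega
  rw [htake, hdrop]
  congr 1
  congr 1
  rw [← pv_map_range_getD image
    (fun row => List.replicate pw (0 : Int) ++ row.take W ++ List.replicate pw (0 : Int))]
  apply List.map_congr_left
  intro i hi
  have hlt : i < image.length := List.mem_range.mp hi
  have hrep : (List.replicate (image.length + 2 * ph) (List.replicate (W + 2 * pw) (0 : Int))).getD (i + ph) []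
      = List.replicate (W + 2 * pw) (0 : Int) := by
    rw [List.getD, List.getElem?_replicate, if_pos (by omega)]
    rfl
  beta_reduce
  rw [hrep]
  have hr := pv_rowfold (fun j => (image.getD i []).getD j 0) W pw
    (List.replicate (W + 2 * pw) (0 : Int)) (by simp; omega)
  beta_reduce at hr
  rw [hr]
  have hWrow : W ≤ (image.getD i []).length := by
    apply h
    rw [List.getD, List.getElem?_eq_getElem hlt]
    exact List.getElem_mem hlt
  rw [pv_map_getD_take _ _ hWrow]
  have htake2 : (List.replicate (W + 2 * pw) (0 : Int)).take pw = List.replicate pw (0 : Int) := by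
    rw [List.take_replicate]
    congr 1
    omega
  have hdrop2 : (List.replicate (W + 2 * pw) (0 : Int)).drop (pw + W) = List.replicate pw (0 : Int) := by
    rw [List.drop_replicate]
    congr 1
    omega
  rw [htake2, hdrop2]
  rfl

-- The erode branches of the two ports agree (padded image abstract).
theorem pv_erode_eq (kernel padded : List (List Int)) (H W : Nat) :
    (List.range H).foldl (fun r i => (List.range W).foldl (fun r j =>
        pvSet2 r i j ((List.range kernel.length).foldl (fun v x =>
          if v = 0 then v else
          (List.range (kernel.getD 0 []).length).foldl (fun v y =>
            if v = 0 then v else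
            if (kernel.getD x []).getD y 0 = 1 then
              (if (padded.getD (i + x) []).getD (j + y) 0 ≠ 1 then 0 else v)
            else v) v) (1 : Int))) r)
      (List.replicate H (List.replicate W (0 : Int)))
    = ((List.range kernel.length).flatMap (fun x =>
        (List.range (kernel.getD 0 []).length).filterMap (fun y =>
          if (kernel.getD x []).getD y 0 = 1 then some (x, y) else none))).foldl
        (fun r xy => (List.range H).map (fun i => (List.range W).map (fun j =>
          if (padded.getD (i + xy.1) []).getD (j + xy.2) 0 ≠ 1 then 0
          else (r.getD i []).getD j 0)))
        (List.replicate H (List.replicate W (1 : Int))) := by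
  rw [pv_resultA]
  have hinit : List.replicate H (List.replicate W (1 : Int))
      = (List.range H).map (fun i => (List.range W).map (fun j =>
          if (True : Prop) then (1 : Int) else 0)) := by
    rw [pv_replicate_eq_range_map, pv_replicate_eq_range_map]
    simp
  rw [hinit, pv_B_erode
    (fun i j xy => (padded.getD (i + xy.1) []).getD (j + xy.2) 0 ≠ 1)
    H W _ (fun _ _ => True) (fun i j => inferInstance)]
  apply List.map_congr_left
  intro i hi
  apply List.map_congr_left
  intro j hj
  rw [pv_erode_outer (fun x y => (kernel.getD x []).getD y 0 = 1)
    (fun x y => (padded.getD (i + x) []).getD (j + y) 0 ≠ 1)]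
  apply if_congr _ rfl rfl
  simp only [true_and, List.mem_flatMap, List.mem_filterMap, not_not]
  constructor
  · rintro hA xy ⟨x, hx, y, hy, hsome⟩
    by_cases hk : (kernel.getD x []).getD y 0 = 1
    · rw [if_pos hk, Option.some_inj] at hsome
      subst hsome
      exact hA x hx y hy hk
    · rw [if_neg hk] at hsome
      exact absurd hsome (by simp)
  · intro hB x hx y hy hk
    exact hB (x, y) ⟨x, hx, y, hy, by rw [if_pos hk]⟩

-- The dilate branches of the two ports agree (padded image abstract).
theorem pv_dilate_eq (kernel padded : List (List Int)) (H W : Nat) :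
    (List.range H).foldl (fun r i => (List.range W).foldl (fun r j =>
        pvSet2 r i j ((List.range kernel.length).foldl (fun v x =>
          if v = 1 then v else
          (List.range (kernel.getD 0 []).length).foldl (fun v y =>
            if v = 1 then v else
            if (kernel.getD x []).getD y 0 = 1 then
              (if (padded.getD (i + x) []).getD (j + y) 0 = 1 then 1 else v)
            else v) v) (0 : Int))) r)
      (List.replicate H (List.replicate W (0 : Int)))
    = ((List.range kernel.length).flatMap (fun x =>
        (List.range (kernel.getD 0 []).length).filterMap (fun y =>
          if (kernel.getD x []).getD y 0 = 1 then some (x, y) else none))).foldl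
        (fun r xy => (List.range H).map (fun i => (List.range W).map (fun j =>
          if (padded.getD (i + xy.1) []).getD (j + xy.2) 0 = 1 then 1
          else (r.getD i []).getD j 0)))
        (List.replicate H (List.replicate W (0 : Int))) := by
  rw [pv_resultA]
  have hinit : List.replicate H (List.replicate W (0 : Int))
      = (List.range H).map (fun i => (List.range W).map (fun j =>
          if (False : Prop) then (1 : Int) else 0)) := by
    rw [pv_replicate_eq_range_map, pv_replicate_eq_range_map]
    simp
  rw [hinit, pv_B_dilate
    (fun i j xy => (padded.getD (i + xy.1) []).getD (j + xy.2) 0 = 1)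
    H W _ (fun _ _ => False) (fun i j => inferInstance)]
  apply List.map_congr_left
  intro i hi
  apply List.map_congr_left
  intro j hj
  rw [pv_dilate_outer (fun x y => (kernel.getD x []).getD y 0 = 1)
    (fun x y => (padded.getD (i + x) []).getD (j + y) 0 = 1)]
  apply if_congr _ rfl rfl
  simp only [false_or, List.mem_flatMap, List.mem_filterMap]
  constructor
  · rintro ⟨x, hx, y, hy, hk, hp⟩
    exact ⟨(x, y), ⟨x, hx, y, hy, by rw [if_pos hk]⟩, hp⟩
  · rintro ⟨xy, ⟨x, hx, y, hy, hsome⟩, hp⟩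
    by_cases hk : (kernel.getD x []).getD y 0 = 1
    · rw [if_pos hk, Option.some_inj] at hsome
      subst hsome
      exact ⟨x, hx, y, hy, hk, hp⟩
    · rw [if_neg hk] at hsome
      exact absurd hsome (by simp)

-- ===== VERDICT (by name: the statement is the Claim_ definition above) =====
theorem morphological_op_spec : Claim_equal_morphological_op := by
  intro image kernel operation _ hpre
  obtain ⟨-, -, himg, -⟩ := hpre
  unfold Spec_morphological_op
  show morphological_op image kernel operation = morphological_op_alt image kernel operation
  simp only [morphological_op, morphological_op_alt]
  rw [pv_padded_eq image (kernel.length / 2) ((kernel.getD 0 []).length / 2)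
    ((image.getD 0 []).length) himg]
  split_ifs with h1 h2
  · exact pv_erode_eq kernel _ image.length ((image.getD 0 []).length)
  · exact pv_dilate_eq kernel _ image.length ((image.getD 0 []).length)
  · rfl
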